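-- pv_equiv track=rewrite | github.com/SAV-Open-Playground/sav-ops | sav_controll_common.py | remove_bird_links
-- ===== SOURCE A (Python) =====
-- def remove_bird_links(bird_cfg, nodes):
--     """remove unused links in bird config"""
--     temp = []
--     for i in range(len(bird_cfg)):
--         line = bird_cfg[i]
--         if "savbgp" in line:
--             # this is a bgo title
--             asns = line.split(" ")[2].split("_")[1:]
--             asns = list(map(int, asns))
--             if (not asns[0] in nodes) or (not asns[1] in nodes):
--                 temp += bird_cfg[i+9:]
--                 return temp, True
--         temp.append(line)
--     return temp, False
-- ===== SOURCE B (Python) =====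
-- def remove_bird_links(bird_cfg, nodes):
--     """remove unused links in bird config"""
--     for i, line in enumerate(bird_cfg):
--         if "savbgp" in line:
--             asns = list(map(int, line.split(" ")[2].split("_")[1:]))
--             if asns[0] not in nodes or asns[1] not in nodes:
--                 return bird_cfg[:i] + bird_cfg[i + 9:], True
--     return bird_cfg[:], False
-- ===== Notes on version B (the rewrite author's own statement) =====
-- stated objective: simpler
-- what changed: Replaces A's per-line accumulator list (append each kept line, then splice the tail) by a find-the-cut-index scan followed by a single slice expression bird_cfg[:i] + bird_cfg[i+9:], with the unchanged-config case a plain copy.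
import Mathlib
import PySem

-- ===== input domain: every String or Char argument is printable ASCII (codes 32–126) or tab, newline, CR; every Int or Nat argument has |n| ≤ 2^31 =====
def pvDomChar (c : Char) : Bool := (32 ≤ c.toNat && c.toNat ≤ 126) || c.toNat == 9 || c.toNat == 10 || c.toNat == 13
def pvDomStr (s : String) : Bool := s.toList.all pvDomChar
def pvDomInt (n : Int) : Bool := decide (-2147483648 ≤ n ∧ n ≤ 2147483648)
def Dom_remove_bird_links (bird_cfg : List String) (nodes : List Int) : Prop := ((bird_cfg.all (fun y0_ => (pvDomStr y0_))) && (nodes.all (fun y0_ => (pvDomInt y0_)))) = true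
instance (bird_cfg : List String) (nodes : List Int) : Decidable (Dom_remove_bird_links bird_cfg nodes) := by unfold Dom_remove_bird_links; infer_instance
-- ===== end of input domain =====

-- B replaces A's line-by-line accumulator by a find-the-cut-index scan plus one slice; return values only (both Pythons return fresh lists).

-- ===== PORT A =====
-- A: index loop carrying the accumulated `temp`; on the first unused savbgp block, splice the tail and stop.
def removeGoA (bird_cfg : List String) (nodes : List Int) (i : Nat) (temp : List String) : List String × Bool :=
  if h : i < bird_cfg.length then
    let line := bird_cfg[i]
    if PySem.Str.isIn "savbgp" line then
      let asns : List Int :=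
        (((PySem.Str.split? (((PySem.Str.split? line " ").getD []).getD 2 "") "_").getD []).drop 1).map
          (fun s => (PySem.Int.ofStr? s).getD 0)
      if !(nodes.contains (asns.getD 0 0)) || !(nodes.contains (asns.getD 1 0)) then
        (temp ++ bird_cfg.drop (i + 9), true)
      else removeGoA bird_cfg nodes (i + 1) (temp ++ [line])
    else removeGoA bird_cfg nodes (i + 1) (temp ++ [line])
  else (temp, false)
termination_by bird_cfg.length - i

def remove_bird_links (bird_cfg : List String) (nodes : List Int) : List String × Bool :=
  removeGoA bird_cfg nodes 0 []

-- ===== PORT B =====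
-- per-line parse: asns = list(map(int, line.split(" ")[2].split("_")[1:]))
def pvAsnStrs (line : String) : List String :=
  ((PySem.Str.split? (((PySem.Str.split? line " ").getD []).getD 2 "") "_").getD []).drop 1

def pvAsns (line : String) : List Int :=
  (pvAsnStrs line).map (fun s => (PySem.Int.ofStr? s).getD 0)

def pvUnused (nodes : List Int) (line : String) : Bool :=
  !(nodes.contains ((pvAsns line).getD 0 0)) || !(nodes.contains ((pvAsns line).getD 1 0))

-- index of the first savbgp line whose link is unused
def pvFindCut (nodes : List Int) : List String → Option Nat
  | [] => none
  | line :: rest =>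
    if PySem.Str.isIn "savbgp" line && pvUnused nodes line then some 0
    else (pvFindCut nodes rest).map (· + 1)

def remove_bird_links_alt (bird_cfg : List String) (nodes : List Int) : List String × Bool :=
  match pvFindCut nodes bird_cfg with
  | some i => (bird_cfg.take i ++ bird_cfg.drop (i + 9), true)
  | none => (bird_cfg, false)

-- ===== PRECONDITION & SPEC =====
-- no raise for a scanned savbgp line: parts[2] exists, every asn string parses,
-- asns[0] exists, and asns[1] exists whenever Python evaluates it (asns[0] ∈ nodes)
def pvLineOK (nodes : List Int) (line : String) : Bool :=
  decide (3 ≤ ((PySem.Str.split? line " ").getD []).length) &&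
  (pvAsnStrs line).all (fun s => (PySem.Int.ofStr? s).isSome) &&
  decide (1 ≤ (pvAsnStrs line).length) &&
  (!(nodes.contains ((pvAsns line).getD 0 0)) || decide (2 ≤ (pvAsnStrs line).length))

-- the line neither raises nor triggers the cut: the scan continues past it
def pvKeeps (nodes : List Int) (line : String) : Bool :=
  !(PySem.Str.isIn "savbgp" line) ||
  (pvLineOK nodes line && nodes.contains ((pvAsns line).getD 0 0) &&
    nodes.contains ((pvAsns line).getD 1 0))

-- Pre_ excludes exactly the inputs where A raises (IndexError/ValueError on a malformed
-- savbgp line that the scan actually reaches); it admits every input on which A returns.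
def Pre_remove_bird_links (bird_cfg : List String) (nodes : List Int) : Prop :=
  ∀ i < bird_cfg.length, (∀ j < i, pvKeeps nodes (bird_cfg.getD j "") = true) →
    PySem.Str.isIn "savbgp" (bird_cfg.getD i "") = true →
    pvLineOK nodes (bird_cfg.getD i "") = true

instance (bird_cfg : List String) (nodes : List Int) : Decidable (Pre_remove_bird_links bird_cfg nodes) := by
  unfold Pre_remove_bird_links; infer_instance

def pvWitness_remove_bird_links : List String × List Int :=
  (["protocol savbgp sav_1_2", "t"], [1])

def Spec_remove_bird_links (bird_cfg : List String) (nodes : List Int) (out : List String × Bool) : Prop := out = remove_bird_links_alt bird_cfg nodes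
instance (bird_cfg : List String) (nodes : List Int) (out : List String × Bool) : Decidable (Spec_remove_bird_links bird_cfg nodes out) := by unfold Spec_remove_bird_links; infer_instance

-- ===== CLAIM (what is proved, stated in full; the proofs are below) =====
def Claim_equal_remove_bird_links : Prop := ∀ (bird_cfg : List String) (nodes : List Int), Dom_remove_bird_links bird_cfg nodes → Pre_remove_bird_links bird_cfg nodes → Spec_remove_bird_links bird_cfg nodes (remove_bird_links bird_cfg nodes)

-- ===== LEMMAS AND PROOFS =====
lemma goA_eq (cfg : List String) (nodes : List Int) :
    ∀ n i temp, cfg.length - i = n →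
      removeGoA cfg nodes i temp =
        match pvFindCut nodes (cfg.drop i) with
        | some j => (temp ++ (cfg.drop i).take j ++ cfg.drop (i + j + 9), true)
        | none => (temp ++ cfg.drop i, false) := by
  intro n
  induction n with
  | zero =>
    intro i temp h
    have hge : cfg.length ≤ i := by omega
    rw [removeGoA]
    simp [List.drop_eq_nil_of_le hge, dif_neg (by omega : ¬ i < cfg.length), pvFindCut]
  | succ n ih =>
    intro i temp h
    have hlt : i < cfg.length := by omega
    have hdrop : cfg.drop i = cfg[i] :: cfg.drop (i + 1) := List.drop_eq_getElem_cons hlt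
    rw [removeGoA]
    simp only [dif_pos hlt]
    by_cases hs : PySem.Str.isIn "savbgp" cfg[i] = true
    · by_cases hu : pvUnused nodes cfg[i] = true
      · have hu3 := hu
        simp only [pvUnused, pvAsns, pvAsnStrs] at hu3
        rw [if_pos hs, if_pos hu3]
        have hcut : pvFindCut nodes (cfg[i] :: cfg.drop (i + 1)) = some 0 := by
          simp only [pvFindCut, hs, hu, Bool.and_self, if_true]
        rw [hdrop, hcut]
        simp
      · have hu2 : pvUnused nodes cfg[i] = false := by simpa using hu
        have hu3 := hu2
        simp only [pvUnused, pvAsns, pvAsnStrs] at hu3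
        rw [if_pos hs, if_neg (by rw [hu3]; simp)]
        rw [ih (i + 1) (temp ++ [cfg[i]]) (by omega)]
        have hcons : pvFindCut nodes (cfg[i] :: cfg.drop (i + 1)) =
            Option.map (· + 1) (pvFindCut nodes (cfg.drop (i + 1))) := by
          simp only [pvFindCut, hu2, Bool.and_false, Bool.false_eq_true, if_false]
        rw [hdrop, hcons]
        cases hf : pvFindCut nodes (cfg.drop (i + 1)) with
        | none => simp
        | some j =>
          simp only [Option.map_some]
          have harith : i + 1 + j + 9 = i + (j + 1) + 9 := by omega
          simp [harith]
          rw [hdrop, List.take_succ_cons, List.cons_append]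
    · have hs2 : PySem.Str.isIn "savbgp" cfg[i] = false := by simpa using hs
      rw [if_neg (by rw [hs2]; simp)]
      rw [ih (i + 1) (temp ++ [cfg[i]]) (by omega)]
      have hcons : pvFindCut nodes (cfg[i] :: cfg.drop (i + 1)) =
          Option.map (· + 1) (pvFindCut nodes (cfg.drop (i + 1))) := by
        simp only [pvFindCut, hs2, Bool.false_and, Bool.false_eq_true, if_false]
      rw [hdrop, hcons]
      cases hf : pvFindCut nodes (cfg.drop (i + 1)) with
      | none => simp
      | some j =>
        simp only [Option.map_some]
        have harith : i + 1 + j + 9 = i + (j + 1) + 9 := by omega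
        simp [harith]
        rw [hdrop, List.take_succ_cons, List.cons_append]

-- ===== VERDICT (by name: the statement is the Claim_ definition above) =====
theorem remove_bird_links_spec : Claim_equal_remove_bird_links := by
  intro cfg nodes _dom _pre
  unfold Spec_remove_bird_links remove_bird_links remove_bird_links_alt
  rw [goA_eq cfg nodes cfg.length 0 [] (by omega)]
  cases hf : pvFindCut nodes cfg with
  | none => simp [hf]
  | some j => simp [hf]
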